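-- pv_equiv track=rewrite | github.com/shura08g/numpy | HackerRank/20_PickingNumbers.py | pickingNumbers2
-- ===== SOURCE A (Python) =====
-- def pickingNumbers2(a):
--     result = 0
--     length = len(a)
--     for i in range(length):
--         for j in range(length):
--             count = 0
--             if abs(a[i] - a[j]) <= 1:
--                 for val in a:
--                     if val == a[i] or val == a[j]:
--                         count += 1
--                 if result < count:
--                     result = count
--     return result
-- ===== SOURCE B (Python) =====
-- def pickingNumbers2(a):
--     cnt = {}
--     for v in a:
--         cnt[v] = cnt.get(v, 0) + 1
--     best = 0
--     for v in cnt: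
--         t = cnt[v] + cnt.get(v + 1, 0)
--         if best < t:
--             best = t
--     return best
-- ===== Notes on version B (the rewrite author's own statement) =====
-- stated objective: faster
-- what changed: Replaces A's triple nested scan over all index pairs (recounting matching elements for each pair) by a single frequency-counter pass and one max over count[v]+count[v+1] per distinct value.
import Mathlib
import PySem

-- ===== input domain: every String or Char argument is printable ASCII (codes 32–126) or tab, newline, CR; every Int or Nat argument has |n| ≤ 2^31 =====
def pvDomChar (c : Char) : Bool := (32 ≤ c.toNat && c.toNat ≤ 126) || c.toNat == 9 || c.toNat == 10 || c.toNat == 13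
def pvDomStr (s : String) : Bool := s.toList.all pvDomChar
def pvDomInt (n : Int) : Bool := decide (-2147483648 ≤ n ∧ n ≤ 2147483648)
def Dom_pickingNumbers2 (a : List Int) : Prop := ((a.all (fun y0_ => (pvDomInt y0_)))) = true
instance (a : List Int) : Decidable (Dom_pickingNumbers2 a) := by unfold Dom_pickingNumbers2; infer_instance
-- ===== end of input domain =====

-- B replaces A's cubic all-pairs scan by a frequency counter and a single max over count[v]+count[v+1] (asymptotically faster).


-- ===== PORT A =====
def pickingNumbers2 (a : List Int) : Int :=
  (PySem.List.pyRange 0 (a.length : Int) 1).foldl (fun result i =>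
    (PySem.List.pyRange 0 (a.length : Int) 1).foldl (fun result j =>
      let ai := PySem.List.pyGetD a i 0
      let aj := PySem.List.pyGetD a j 0
      if |ai - aj| ≤ 1 then
        let count := a.foldl (fun count val =>
          if val = ai ∨ val = aj then count + 1 else count) (0 : Int)
        if result < count then count else result
      else result) result) 0

-- ===== PORT B =====
def pickingNumbers2_alt (a : List Int) : Int :=
  let cnt := a.foldl (fun d v => d.insert v (d.getD v 0 + 1)) (PySem.Dict.empty : PySem.Dict Int Int)
  cnt.keys.foldl (fun best v =>
    let t := cnt.getD v 0 + cnt.getD (v + 1) 0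
    if best < t then t else best) 0

-- ===== PRECONDITION & SPEC =====
def Spec_pickingNumbers2 (a : List Int) (out : Int) : Prop := out = pickingNumbers2_alt a
instance (a : List Int) (out : Int) : Decidable (Spec_pickingNumbers2 a out) := by unfold Spec_pickingNumbers2; infer_instance

-- ===== CLAIM (what is proved, stated in full; the proofs are below) =====
def Claim_equal_pickingNumbers2 : Prop := ∀ (a : List Int), Dom_pickingNumbers2 a → Spec_pickingNumbers2 a (pickingNumbers2 a)

-- ===== LEMMAS AND PROOFS =====

-- abstract views of the two programs
def gA (a : List Int) (x y : Int) : Int :=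
  if x = y then (a.count x : Int) else (a.count x : Int) + (a.count y : Int)

def gB (a : List Int) (v : Int) : Int := (a.count v : Int) + (a.count (v + 1) : Int)

def stepA (a : List Int) (x r y : Int) : Int :=
  if |x - y| ≤ 1 then (if r < gA a x y then gA a x y else r) else r

def innerA (a l : List Int) (x r : Int) : Int := l.foldl (stepA a x) r

def outerA (a l : List Int) (r : Int) : Int := l.foldl (fun r x => innerA a a x r) r

def foldB (a l : List Int) (r : Int) : Int :=
  l.foldl (fun best v => if best < gB a v then gB a v else best) r

lemma countfold_eq (x y : Int) (l : List Int) (r : Int) :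
    l.foldl (fun c v => if v = x ∨ v = y then c + 1 else c) r = r + gA l x y := by
  induction l generalizing r with
  | nil => simp [gA]
  | cons h t ih =>
    simp only [List.foldl_cons, ih, gA, List.count_cons]
    by_cases hxy : x = y <;> by_cases hx : h = x <;> by_cases hy : h = y <;>
      simp_all <;> omega

lemma A_eq (a : List Int) : pickingNumbers2 a = outerA a a 0 := by
  unfold pickingNumbers2
  rw [PySem.List.foldl_pyRange_zero_pyGetD' a 0
    (fun result ai => (PySem.List.pyRange 0 (a.length : Int) 1).foldl (fun result j =>
      let aj := PySem.List.pyGetD a j 0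
      if |ai - aj| ≤ 1 then
        let count := a.foldl (fun count val =>
          if val = ai ∨ val = aj then count + 1 else count) (0 : Int)
        if result < count then count else result
      else result) result) 0]
  unfold outerA
  congr 1
  funext r x
  rw [PySem.List.foldl_pyRange_zero_pyGetD' a 0
    (fun result aj =>
      if |x - aj| ≤ 1 then
        let count := a.foldl (fun count val =>
          if val = x ∨ val = aj then count + 1 else count) (0 : Int)
        if result < count then count else result
      else result) r]
  unfold innerA
  congr 1
  funext r y
  simp only [stepA, countfold_eq, zero_add]

lemma B_eq (a : List Int) : pickingNumbers2_alt a = foldB a (PySem.Set.ofList a) 0 := by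
  unfold pickingNumbers2_alt foldB
  rw [PySem.Dict.foldl_insert_getD_add_one_eq_counter]
  simp only [PySem.Dict.keys_counter, PySem.Dict.getD_counter, gB]

lemma stepA_ge (a : List Int) (x r y : Int) : r ≤ stepA a x r y := by
  unfold stepA; split_ifs <;> omega

lemma inner_ge (a l : List Int) (x r : Int) : r ≤ innerA a l x r := by
  induction l generalizing r with
  | nil => simp [innerA]
  | cons h t ih =>
    calc r ≤ stepA a x r h := stepA_ge a x r h
    _ ≤ innerA a t x (stepA a x r h) := ih _

lemma inner_le (a l : List Int) (x : Int) {r B : Int} (h0 : r ≤ B)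
    (h : ∀ y ∈ l, |x - y| ≤ 1 → gA a x y ≤ B) : innerA a l x r ≤ B := by
  induction l generalizing r with
  | nil => simpa [innerA]
  | cons hd t ih =>
    refine ih ?_ (fun y hy hxy => h y (List.mem_cons_of_mem _ hy) hxy)
    unfold stepA; split_ifs with h1 h2
    · exact h hd (List.mem_cons_self) h1
    · exact h0
    · exact h0

lemma inner_attain (a l : List Int) (x r y : Int) (hy : y ∈ l) (hxy : |x - y| ≤ 1) :
    gA a x y ≤ innerA a l x r := by
  induction l generalizing r with
  | nil => cases hy
  | cons hd t ih =>
    rcases List.mem_cons.mp hy with h | h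
    · subst h
      refine le_trans ?_ (inner_ge a t x (stepA a x r y))
      unfold stepA; split_ifs <;> omega
    · exact ih _ h

lemma outer_ge (a l : List Int) (r : Int) : r ≤ outerA a l r := by
  induction l generalizing r with
  | nil => simp [outerA]
  | cons h t ih => exact le_trans (inner_ge a a h r) (ih _)

lemma outer_le (a l : List Int) {r B : Int} (h0 : r ≤ B)
    (h : ∀ x ∈ l, ∀ y ∈ a, |x - y| ≤ 1 → gA a x y ≤ B) : outerA a l r ≤ B := by
  induction l generalizing r with
  | nil => simpa [outerA]
  | cons hd t ih =>
    refine ih (inner_le a a hd h0 (h hd List.mem_cons_self)) ?_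
    exact fun x hx => h x (List.mem_cons_of_mem _ hx)

lemma outer_attain (a l : List Int) (r x y : Int) (hx : x ∈ l) (hy : y ∈ a)
    (hxy : |x - y| ≤ 1) : gA a x y ≤ outerA a l r := by
  induction l generalizing r with
  | nil => cases hx
  | cons hd t ih =>
    rcases List.mem_cons.mp hx with h | h
    · subst h
      exact le_trans (inner_attain a a x r y hy hxy) (outer_ge a t _)
    · exact ih _ h

lemma foldB_ge (a l : List Int) (r : Int) : r ≤ foldB a l r := by
  induction l generalizing r with
  | nil => simp [foldB]
  | cons h t ih =>
    refine le_trans ?_ (ih _)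
    dsimp only; split_ifs <;> omega

lemma foldB_le (a l : List Int) {r B : Int} (h0 : r ≤ B)
    (h : ∀ v ∈ l, gB a v ≤ B) : foldB a l r ≤ B := by
  induction l generalizing r with
  | nil => simpa [foldB]
  | cons hd t ih =>
    refine ih ?_ (fun v hv => h v (List.mem_cons_of_mem _ hv))
    have := h hd List.mem_cons_self
    dsimp only; split_ifs <;> omega

lemma foldB_attain (a l : List Int) (r v : Int) (hv : v ∈ l) : gB a v ≤ foldB a l r := by
  induction l generalizing r with
  | nil => cases hv
  | cons hd t ih =>
    rcases List.mem_cons.mp hv with h | h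
    · subst h
      refine le_trans ?_ (foldB_ge a t _)
      dsimp only; split_ifs <;> omega
    · exact ih _ h

lemma A_le_B (a : List Int) : outerA a a 0 ≤ foldB a (PySem.Set.ofList a) 0 := by
  refine outer_le a a (foldB_ge a _ 0) ?_
  intro x hx y hy hxy
  have hxS : x ∈ PySem.Set.ofList a := (PySem.Set.mem_ofList a x).mpr hx
  have hyS : y ∈ PySem.Set.ofList a := (PySem.Set.mem_ofList a y).mpr hy
  unfold gA
  split_ifs with hxy'
  · refine le_trans ?_ (foldB_attain a _ 0 x hxS)
    unfold gB
    have : (0:Int) ≤ (a.count (x+1) : Int) := Int.natCast_nonneg _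
    omega
  · -- x ≠ y and |x - y| ≤ 1 : y = x + 1 or x = y + 1
    rcases (by have := abs_le.mp hxy; omega : y = x + 1 ∨ x = y + 1) with h | h
    · subst h; exact foldB_attain a _ 0 x hxS
    · subst h
      have := foldB_attain a _ 0 y hyS
      unfold gB at this; omega

lemma B_le_A (a : List Int) : foldB a (PySem.Set.ofList a) 0 ≤ outerA a a 0 := by
  refine foldB_le a _ (outer_ge a a 0) ?_
  intro v hv
  have hva : v ∈ a := (PySem.Set.mem_ofList a v).mp hv
  by_cases h1 : (v + 1) ∈ a
  · have := outer_attain a a 0 v (v + 1) hva h1 (by simp)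
    unfold gA at this
    rw [if_neg (by omega)] at this
    exact this
  · have hz : a.count (v + 1) = 0 := List.count_eq_zero.mpr h1
    have := outer_attain a a 0 v v hva hva (by simp)
    unfold gA at this
    rw [if_pos rfl] at this
    unfold gB; rw [hz]; simpa using this

-- ===== VERDICT (by name: the statement is the Claim_ definition above) =====
theorem pickingNumbers2_spec : Claim_equal_pickingNumbers2 := by
  intro a _
  unfold Spec_pickingNumbers2
  rw [A_eq, B_eq]
  exact le_antisymm (A_le_B a) (B_le_A a)
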